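-- pv_equiv track=rewrite | github.com/taxijjang/algorithm | 오늘의집220409/3번.py | check_college
-- ===== SOURCE A (Python) =====
-- def check_college(college):
--     index = 0
--
--     while True:
--         has_change = False
--         for key, value in college.items():
--             if value.isalpha():
--                 continue
--             elif not value.isalpha():
--                 if college[key] == college[value[1:-1]]:
--                     continue
--                 college[key] = college[value[1:-1]]
--                 has_change = True
--         if not has_change:
--             break
--     return college
-- ===== SOURCE B (Python) =====
-- # Memoized path-following resolution: each key's reference chain is walked once
-- # and every key on the walked path is cached, so the whole dict is resolved in
-- # one pass (A re-scans the whole dict until a fixed point).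
-- # Note: A mutates and returns its argument dict; B returns a fresh dict with
-- # the same content (the equivalence claimed is about the return value).
-- def check_college(college):
--     memo = {}
--
--     def resolve(key):
--         path = []
--         while key not in memo:
--             value = college[key]
--             if value.isalpha():
--                 memo[key] = value
--                 break
--             path.append(key)
--             key = value[1:-1]
--         result = memo[key]
--         for k in path:
--             memo[k] = result
--         return result
--
--     return {key: resolve(key) for key in college}
-- ===== Notes on version B (the rewrite author's own statement) =====
-- stated objective: alternative
-- what changed: A repeatedly sweeps the whole dict, copying each reference one step closer to its target until a fixed point; B instead walks each key's reference chain once, caching the result for every key on the walked path in a memo dict shared across keys.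
-- outside the precondition, e.g. on check_college({'k': '[k]'}): A returns {'k': '[k]'}, B does not finish within the time limit
import Mathlib
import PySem

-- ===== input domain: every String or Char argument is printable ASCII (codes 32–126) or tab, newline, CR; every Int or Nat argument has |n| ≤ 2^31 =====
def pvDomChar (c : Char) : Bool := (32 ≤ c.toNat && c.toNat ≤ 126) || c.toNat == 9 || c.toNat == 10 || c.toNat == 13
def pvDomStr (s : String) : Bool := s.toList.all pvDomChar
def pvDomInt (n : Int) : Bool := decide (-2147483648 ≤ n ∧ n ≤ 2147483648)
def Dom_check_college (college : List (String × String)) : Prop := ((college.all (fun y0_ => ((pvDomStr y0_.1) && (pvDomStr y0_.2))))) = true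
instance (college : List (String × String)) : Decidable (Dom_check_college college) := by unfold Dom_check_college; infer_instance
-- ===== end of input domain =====

-- B resolves each reference chain once with a shared memo (one pass) instead of A's
-- repeated full-dict sweeps to a fixed point. A mutates and returns its argument dict;
-- B builds a fresh dict with the same content: the equivalence is about the return value.

-- shared tiny helper: value[1:-1]
def pvTarget (v : String) : String := PySem.Str.slice v (some 1) (some (-1))

-- ===== PORT A =====
-- body of A's `for key, value in college.items()` loop (st = (dict so far, has_change))
def pvStepA (st : PySem.Dict String String × Bool) (key : String) : PySem.Dict String String × Bool :=
  let value := st.1.getD key ""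
  if PySem.Str.strIsalpha value then st
  else if !(PySem.Str.strIsalpha value) then
    if st.1.getD key "" == st.1.getD (pvTarget value) "" then st
    else (st.1.insert key (st.1.getD (pvTarget value) ""), true)
  else st

-- one sweep of the `for` loop; keys never change, values are read live
def pvPassA (d : PySem.Dict String String) : PySem.Dict String String × Bool :=
  d.keys.foldl pvStepA (d, false)

-- the `while True` loop; the fuel only makes it total in Lean, it is never
-- exhausted on inputs satisfying Pre_check_college
def pvLoopA : Nat → PySem.Dict String String → PySem.Dict String String
  | 0, d => d
  | f + 1, d =>
    match pvPassA d with
    | (d', true) => pvLoopA f d'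
    | (d', false) => d'

def check_college (college : List (String × String)) : List (String × String) :=
  (pvLoopA (college.length * college.length + 2) (PySem.Dict.mk college)).items

-- ===== PORT B =====
-- B's inner `resolve`: follow the chain collecting the path, then write the result
-- back to every key on the path (fuel again only for Lean totality)
def pvResolveLoop (c : PySem.Dict String String) :
    Nat → PySem.Dict String String → List String → String → String × PySem.Dict String String
  | 0, memo, _, _ => ("", memo)
  | f + 1, memo, path, key =>
    match memo.get? key with
    | some result => (result, path.foldl (fun m k => m.insert k result) memo)
    | none =>
      let value := c.getD key ""
      if PySem.Str.strIsalpha value then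
        (value, path.foldl (fun m k => m.insert k value) (memo.insert key value))
      else
        pvResolveLoop c f memo (path ++ [key]) (pvTarget value)

-- body of B's final dict comprehension (st = (items so far, memo))
def pvStepB (c : PySem.Dict String String) (fuel : Nat)
    (st : List (String × String) × PySem.Dict String String) (key : String) :
    List (String × String) × PySem.Dict String String :=
  let p := pvResolveLoop c fuel st.2 [] key
  (st.1 ++ [(key, p.1)], p.2)

def check_college_alt (college : List (String × String)) : List (String × String) :=
  let c := PySem.Dict.mk college
  (c.keys.foldl (pvStepB c (college.length + 1)) ([], PySem.Dict.empty)).1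

-- ===== PRECONDITION & SPEC =====
-- chase the reference chain from key k (f is a fuel/depth bound): the standard
-- decidable statement of "every reference chain ends, within the number of keys,
-- at an alphabetic value" — acyclicity of a finite functional graph
def pvResK (c : PySem.Dict String String) : Nat → String → Option String
  | 0, _ => none
  | f + 1, k =>
    match c.get? k with
    | none => none
    | some v => if PySem.Str.strIsalpha v then some v else pvResK c f (pvTarget v)

-- Pre_ excludes (a) inputs where following some reference chain hits a missing key or
-- never reaches an alphabetic value because the chain is cyclic — on a missing key A
-- raises KeyError, and on a cycle A happens to return leftover half-resolved reference
-- strings while B diverges — and (b) duplicate-key association lists, which do not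
-- represent a Python dict (A's parameter is a dict, so its keys are always distinct).
def Pre_check_college (college : List (String × String)) : Prop :=
  (college.map Prod.fst).Nodup ∧
  ∀ p ∈ college, (pvResK (PySem.Dict.mk college) (college.length + 1) p.1).isSome = true
instance (college : List (String × String)) : Decidable (Pre_check_college college) := by
  unfold Pre_check_college; infer_instance

def pvWitness_check_college : (List (String × String)) := [("a", "[b]"), ("b", "Seoul"), ("c", "KAIST")]

def Spec_check_college (college : List (String × String)) (out : List (String × String)) : Prop := out = check_college_alt college
instance (college : List (String × String)) (out : List (String × String)) : Decidable (Spec_check_college college out) := by unfold Spec_check_college; infer_instance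

-- ===== CLAIM (what is proved, stated in full; the proofs are below) =====
def Claim_equal_check_college : Prop := ∀ (college : List (String × String)), Dom_check_college college → Pre_check_college college → Spec_check_college college (check_college college)

-- ===== LEMMAS AND PROOFS =====

def pvDistK (c : PySem.Dict String String) : Nat → String → Option Nat
  | 0, _ => none
  | f + 1, k =>
    match c.get? k with
    | none => none
    | some v => if PySem.Str.strIsalpha v then some 0 else (pvDistK c f (pvTarget v)).map (· + 1)

theorem pvResK_mono (c : PySem.Dict String String) (f g : Nat) (k : String) (r : String)
    (hfg : f ≤ g) (h : pvResK c f k = some r) : pvResK c g k = some r := by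
  induction f generalizing g k r with
  | zero => simp [pvResK] at h
  | succ f ih =>
    obtain ⟨g, rfl⟩ : ∃ g', g = g' + 1 := ⟨g - 1, by omega⟩
    rw [pvResK] at h ⊢
    cases hv : c.get? k with
    | none => simp [hv] at h
    | some v =>
      simp only [hv] at h ⊢
      cases ha : PySem.Str.strIsalpha v with
      | true => simpa only [ha, reduceIte] using h
      | false =>
        simp only [ha, Bool.false_eq_true, reduceIte] at h ⊢
        exact ih _ _ _ (by omega) h

theorem pvDistK_mono (c : PySem.Dict String String) (f g : Nat) (k : String) (m : Nat)
    (hfg : f ≤ g) (h : pvDistK c f k = some m) : pvDistK c g k = some m := by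
  induction f generalizing g k m with
  | zero => simp [pvDistK] at h
  | succ f ih =>
    obtain ⟨g, rfl⟩ : ∃ g', g = g' + 1 := ⟨g - 1, by omega⟩
    rw [pvDistK] at h ⊢
    cases hv : c.get? k with
    | none => simp [hv] at h
    | some v =>
      simp only [hv] at h ⊢
      cases ha : PySem.Str.strIsalpha v with
      | true => simpa only [ha, reduceIte] using h
      | false =>
        simp only [ha, Bool.false_eq_true, reduceIte, Option.map_eq_some_iff] at h ⊢
        obtain ⟨m', hm', rfl⟩ := h
        exact ⟨m', ih _ _ _ (by omega) hm', rfl⟩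

theorem pvResK_det (c : PySem.Dict String String) (f g : Nat) (k : String) (r r' : String)
    (h : pvResK c f k = some r) (h' : pvResK c g k = some r') : r = r' := by
  have h1 := pvResK_mono c f (max f g) k r (le_max_left _ _) h
  have h2 := pvResK_mono c g (max f g) k r' (le_max_right _ _) h'
  rw [h1] at h2; exact (Option.some_inj.mp h2).symm |>.symm

theorem pvDistK_isSome (c : PySem.Dict String String) (f : Nat) (k : String)
    (h : (pvResK c f k).isSome = true) : (pvDistK c f k).isSome = true := by
  induction f generalizing k with
  | zero => simp [pvResK] at h
  | succ f ih =>
    rw [pvResK] at h; rw [pvDistK]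
    cases hv : c.get? k with
    | none => simp [hv] at h
    | some v =>
      simp only [hv] at h ⊢
      cases ha : PySem.Str.strIsalpha v with
      | true => simp only [reduceIte, Option.isSome_some]
      | false =>
        simp only [ha, Bool.false_eq_true, reduceIte] at h ⊢
        simpa using ih _ h

theorem pvDistK_lt (c : PySem.Dict String String) (f : Nat) (k : String) (m : Nat)
    (h : pvDistK c f k = some m) : m < f := by
  induction f generalizing k m with
  | zero => simp [pvDistK] at h
  | succ f ih =>
    rw [pvDistK] at h
    cases hv : c.get? k with
    | none => simp [hv] at h
    | some v =>
      simp only [hv] at h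
      cases ha : PySem.Str.strIsalpha v with
      | true => simp only [ha, reduceIte, Option.some_inj] at h; omega
      | false =>
        simp only [ha, Bool.false_eq_true, reduceIte, Option.map_eq_some_iff] at h
        obtain ⟨m', hm', rfl⟩ := h
        have := ih _ _ hm'; omega

def pvResV (c : PySem.Dict String String) (f : Nat) (v : String) : Option String :=
  if PySem.Str.strIsalpha v then some v else pvResK c f (pvTarget v)

def pvDistV (c : PySem.Dict String String) (f : Nat) (v : String) : Option Nat :=
  if PySem.Str.strIsalpha v then some 0 else (pvDistK c f (pvTarget v)).map (· + 1)

theorem pvResK_succ (c : PySem.Dict String String) (f : Nat) (k : String) :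
    pvResK c (f + 1) k = match c.get? k with | none => none | some v => pvResV c f v := by
  cases h : c.get? k <;> simp only [pvResK, pvResV, h]

theorem pvDistK_succ (c : PySem.Dict String String) (f : Nat) (k : String) :
    pvDistK c (f + 1) k = match c.get? k with | none => none | some v => pvDistV c f v := by
  cases h : c.get? k <;> simp only [pvDistK, pvDistV, h]

theorem pvResV_mono (c : PySem.Dict String String) (f g : Nat) (v : String) (r : String)
    (hfg : f ≤ g) (h : pvResV c f v = some r) : pvResV c g v = some r := by
  unfold pvResV at h ⊢
  cases ha : PySem.Str.strIsalpha v with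
  | true => simpa only [ha, reduceIte] using h
  | false =>
    simp only [ha, Bool.false_eq_true, reduceIte] at h ⊢
    exact pvResK_mono c f g _ r hfg h

theorem pvDistV_mono (c : PySem.Dict String String) (f g : Nat) (v : String) (m : Nat)
    (hfg : f ≤ g) (h : pvDistV c f v = some m) : pvDistV c g v = some m := by
  unfold pvDistV at h ⊢
  cases ha : PySem.Str.strIsalpha v with
  | true => simpa only [ha, reduceIte] using h
  | false =>
    simp only [ha, Bool.false_eq_true, reduceIte, Option.map_eq_some_iff] at h ⊢
    obtain ⟨m', hm', rfl⟩ := h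
    exact ⟨m', pvDistK_mono c f g _ m' hfg hm', rfl⟩

theorem pvResV_det (c : PySem.Dict String String) (f g : Nat) (v : String) (r r' : String)
    (h : pvResV c f v = some r) (h' : pvResV c g v = some r') : r = r' := by
  have h1 := pvResV_mono c f (max f g) v r (le_max_left _ _) h
  have h2 := pvResV_mono c g (max f g) v r' (le_max_right _ _) h'
  rw [h1] at h2; exact Option.some_inj.mp h2

theorem pvDistV_det (c : PySem.Dict String String) (f g : Nat) (v : String) (m m' : Nat)
    (h : pvDistV c f v = some m) (h' : pvDistV c g v = some m') : m = m' := by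
  have h1 := pvDistV_mono c f (max f g) v m (le_max_left _ _) h
  have h2 := pvDistV_mono c g (max f g) v m' (le_max_right _ _) h'
  rw [h1] at h2; exact Option.some_inj.mp h2

theorem pvDistV_isSome (c : PySem.Dict String String) (f : Nat) (v : String)
    (h : (pvResV c f v).isSome = true) : (pvDistV c f v).isSome = true := by
  unfold pvResV at h; unfold pvDistV
  cases ha : PySem.Str.strIsalpha v with
  | true => simp only [reduceIte, Option.isSome_some]
  | false =>
    simp only [ha, Bool.false_eq_true, reduceIte] at h ⊢
    simpa using pvDistK_isSome c f _ h

theorem pvDistV_le (c : PySem.Dict String String) (f : Nat) (v : String) (m : Nat)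
    (h : pvDistV c f v = some m) : m ≤ f := by
  unfold pvDistV at h
  cases ha : PySem.Str.strIsalpha v with
  | true => simp only [ha, reduceIte, Option.some_inj] at h; omega
  | false =>
    simp only [ha, Bool.false_eq_true, reduceIte, Option.map_eq_some_iff] at h
    obtain ⟨m', hm', rfl⟩ := h
    have := pvDistK_lt c f _ m' hm'; omega

theorem pvChainStep (c : PySem.Dict String String) (N : Nat) (v r : String)
    (hna : PySem.Str.strIsalpha v = false) (h : pvResV c N v = some r) :
    ∃ vt, c.get? (pvTarget v) = some vt ∧ pvResV c N vt = some r ∧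
      ∀ m, pvDistV c N v = some m → ∃ mt, pvDistV c N vt = some mt ∧ m = mt + 1 := by
  unfold pvResV at h
  simp only [hna, Bool.false_eq_true, reduceIte] at h
  obtain ⟨N', rfl⟩ : ∃ N', N = N' + 1 := by
    cases N with
    | zero => simp [pvResK] at h
    | succ N' => exact ⟨N', rfl⟩
  rw [pvResK_succ] at h
  cases hv : c.get? (pvTarget v) with
  | none =>
    simp only [hv] at h
    exact absurd h (by simp)
  | some vt =>
    simp only [hv] at h
    refine ⟨vt, rfl, pvResV_mono c N' (N' + 1) vt r (by omega) h, ?_⟩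
    intro m hm
    unfold pvDistV at hm
    simp only [hna, Bool.false_eq_true, reduceIte, Option.map_eq_some_iff] at hm
    obtain ⟨mt, hmt, rfl⟩ := hm
    rw [pvDistK_succ] at hmt
    simp only [hv] at hmt
    exact ⟨mt, pvDistV_mono c N' (N' + 1) vt mt (by omega) hmt, rfl⟩

def pvMemoInv (c : PySem.Dict String String) (N : Nat) (memo : PySem.Dict String String) : Prop :=
  ∀ k r, memo.get? k = some r → pvResK c N k = some r

theorem pvMemoInv_insert (c : PySem.Dict String String) (N : Nat)
    (memo : PySem.Dict String String) (k r : String)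
    (hm : pvMemoInv c N memo) (hk : pvResK c N k = some r) :
    pvMemoInv c N (memo.insert k r) := by
  intro k' r' h
  rw [PySem.Dict.get?_insert] at h
  by_cases hkk : k' = k
  · simp only [hkk, reduceIte, Option.some_inj] at h; subst hkk; rw [← h]; exact hk
  · simp only [hkk, reduceIte] at h; exact hm k' r' h

theorem pvWriteback (c : PySem.Dict String String) (N : Nat) (r : String) :
    ∀ (path : List String) (memo : PySem.Dict String String),
      (∀ k ∈ path, pvResK c N k = some r) → pvMemoInv c N memo →
      pvMemoInv c N (path.foldl (fun m k => m.insert k r) memo) := by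
  intro path
  induction path with
  | nil => intro memo _ hm; simpa using hm
  | cons a path ih =>
    intro memo hall hm
    simp only [List.foldl_cons]
    exact ih _ (fun k hk => hall k (by simp [hk])) (pvMemoInv_insert c N memo a r hm (hall a (by simp)))

theorem pvMemKeys (c : PySem.Dict String String) (k : String) (v : String)
    (h : c.get? k = some v) : k ∈ c.keys := by
  by_contra hk
  have := (PySem.Dict.get?_eq_none_iff_not_mem_keys (d := c) (k := k)).mpr hk
  rw [this] at h
  exact absurd h (by simp)

theorem pvResolveLoop_ok (c : PySem.Dict String String) (N : Nat)
    (hpre : ∀ k ∈ c.keys, (pvResK c N k).isSome = true) :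
    ∀ (f : Nat) (k : String) (r : String) (path : List String) (memo : PySem.Dict String String),
      pvResK c f k = some r → (∀ k' ∈ path, pvResK c N k' = some r) → pvMemoInv c N memo →
      ∃ memo', pvResolveLoop c f memo path k = (r, memo') ∧ pvMemoInv c N memo' := by
  intro f
  induction f with
  | zero => intro k r path memo h; simp [pvResK] at h
  | succ f ih =>
    intro k r path memo h hall hm
    have hkN : pvResK c N k = some r := by
      rw [pvResK_succ] at h
      cases hv : c.get? k with
      | none => simp [hv] at h
      | some v =>
        obtain ⟨r', hr'⟩ := Option.isSome_iff_exists.mp (hpre k (pvMemKeys c k v hv))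
        have hf : pvResK c (f+1) k = some r := by rw [pvResK_succ]; simpa [hv] using h
        have : r = r' := pvResK_det c (f+1) N k r r' hf hr'
        rw [this]; exact hr' 
    rw [pvResolveLoop]
    cases hmk : memo.get? k with
    | some result =>
      have heq : r = result := (pvResK_det c N N k result r (hm k result hmk) hkN).symm
      subst heq
      exact ⟨_, rfl, pvWriteback c N r path memo hall hm⟩
    | none =>
      rw [pvResK_succ] at h
      cases hv : c.get? k with
      | none => simp [hv] at h
      | some v =>
        simp only [hv] at h
        have hgd : c.getD k "" = v := PySem.Dict.getD_of_get?_eq_some c "" hv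
        unfold pvResV at h
        cases ha : PySem.Str.strIsalpha v with
        | true =>
          simp only [ha, reduceIte, Option.some_inj] at h
          subst h
          simp only [hgd, ha, reduceIte]
          exact ⟨_, rfl, pvWriteback c N v path _ hall
            (pvMemoInv_insert c N memo k v hm hkN)⟩
        | false =>
          simp only [ha, Bool.false_eq_true, reduceIte] at h
          simp only [hgd, ha, Bool.false_eq_true, reduceIte]
          exact ih (pvTarget v) r (path ++ [k]) memo h
            (by intro k' hk'; rcases List.mem_append.mp hk' with h1 | h1
                · exact hall k' h1
                · simp only [List.mem_singleton] at h1; subst h1; exact hkN) hm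

def pvR (c : PySem.Dict String String) (N : Nat) (k : String) : String :=
  (pvResK c N k).getD ""

def pvInv (c : PySem.Dict String String) (N : Nat) (d : PySem.Dict String String) : Prop :=
  d.keys = c.keys ∧
  ∀ k v₀, c.get? k = some v₀ →
    ∃ v m m₀, d.get? k = some v ∧
      pvResV c N v = pvResV c N v₀ ∧ (pvResV c N v₀).isSome = true ∧
      pvDistV c N v = some m ∧ pvDistV c N v₀ = some m₀ ∧ m ≤ m₀

def pvPot (c : PySem.Dict String String) (N : Nat) (d : PySem.Dict String String) : Nat :=
  (c.keys.map (fun k => (pvDistV c N (d.getD k "")).getD 0)).sum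

theorem pvSum_le (l : List String) (f : String → Nat) (b : Nat)
    (h : ∀ x ∈ l, f x ≤ b) : (l.map f).sum ≤ l.length * b := by
  induction l with
  | nil => simp
  | cons a l ih =>
    simp only [List.map_cons, List.sum_cons, List.length_cons]
    have := ih (fun x hx => h x (by simp [hx]))
    have := h a (by simp)
    nlinarith

theorem pvSum_lt (l : List String) (f g : String → Nat) (k : String)
    (hk : k ∈ l) (hle : ∀ x ∈ l, g x ≤ f x) (hlt : g k < f k) :
    (l.map g).sum < (l.map f).sum := by
  induction l with
  | nil => simp at hk
  | cons a l ih =>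
    simp only [List.map_cons, List.sum_cons]
    by_cases hak : a = k
    · subst hak
      have hs : (l.map g).sum ≤ (l.map f).sum :=
        List.sum_le_sum (fun i hi => hle i (by simp [hi]))
      omega
    · have hkl : k ∈ l := by rcases List.mem_cons.mp hk with h1 | h1; exact absurd h1.symm hak; exact h1
      have := ih hkl (fun x hx => hle x (by simp [hx]))
      have := hle a (by simp)
      omega

theorem pvKeyVal (c : PySem.Dict String String) (k : String) (hk : k ∈ c.keys) :
    ∃ v₀, c.get? k = some v₀ := by
  cases hv : c.get? k with
  | none => exact absurd hk ((PySem.Dict.get?_eq_none_iff_not_mem_keys (d := c) (k := k)).mp hv)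
  | some v => exact ⟨v, rfl⟩

theorem pvUpdateFacts (c : PySem.Dict String String) (N : Nat)
    (d : PySem.Dict String String) (hInv : pvInv c N d) (k v : String)
    (hkc : k ∈ c.keys) (hdk : d.get? k = some v)
    (hna : PySem.Str.strIsalpha v = false) :
    ∃ w m mw, d.get? (pvTarget v) = some w ∧ pvDistV c N v = some m ∧
      pvDistV c N w = some mw ∧ mw < m ∧
      pvInv c N (d.insert k w) ∧ pvResV c N w = pvResV c N v := by
  obtain ⟨v₀, hv₀⟩ := pvKeyVal c k hkc
  obtain ⟨v', m, m₀, hdk', heq, hsome, hdm, hdm₀, hmm₀⟩ := hInv.2 k v₀ hv₀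
  rw [hdk] at hdk'
  have hvv : v = v' := Option.some_inj.mp hdk'
  subst hvv
  obtain ⟨r, hr⟩ := Option.isSome_iff_exists.mp hsome
  have hrv : pvResV c N v = some r := heq.trans hr
  obtain ⟨vt, hvt, hrvt, hdist⟩ := pvChainStep c N v r hna hrv
  obtain ⟨mt, hmt, hmmt⟩ := hdist m hdm
  have htk : pvTarget v ∈ c.keys := pvMemKeys c _ vt hvt
  obtain ⟨w, mw, m₀t, hdw, heqw, hsomew, hdmw, hdm₀t, hmwle⟩ := hInv.2 (pvTarget v) vt hvt
  have hm₀t : m₀t = mt := pvDistV_det c N N vt m₀t mt hdm₀t hmt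
  have hmwlt : mw < m := by omega
  have hrw : pvResV c N w = some r := heqw.trans hrvt
  refine ⟨w, m, mw, hdw, hdm, hdmw, hmwlt, ⟨?_, ?_⟩, hrw.trans hrv.symm⟩
  · rw [PySem.Dict.keys_insert_of_contains, hInv.1]
    rw [PySem.Dict.contains_eq_isSome_get?, hdk]; rfl
  · intro k' v₀' hv₀'
    by_cases hk' : k' = k
    · subst hk'
      have hv00 : v₀ = v₀' := by rw [hv₀] at hv₀'; exact Option.some_inj.mp hv₀'
      subst hv00
      exact ⟨w, mw, m₀, by rw [PySem.Dict.get?_insert]; simp, hrw.trans hr.symm,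
        hsome, hdmw, hdm₀, by omega⟩
    · obtain ⟨v'', m', m₀', h1, h2, h3, h4, h5, h6⟩ := hInv.2 k' v₀' hv₀'
      exact ⟨v'', m', m₀', by rw [PySem.Dict.get?_insert]; simp [hk', h1], h2, h3, h4, h5, h6⟩

theorem pvPotInsert (c : PySem.Dict String String) (N : Nat)
    (d : PySem.Dict String String) (k w v : String) (m mw : Nat)
    (hkc : k ∈ c.keys) (hdk : d.get? k = some v)
    (hdm : pvDistV c N v = some m) (hdmw : pvDistV c N w = some mw) (hmw : mw < m) :
    pvPot c N (d.insert k w) < pvPot c N d := by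
  unfold pvPot
  apply pvSum_lt _ _ _ k hkc
  · intro x _
    rw [PySem.Dict.getD_insert]
    by_cases hxk : x = k
    · subst hxk
      rw [if_pos rfl, PySem.Dict.getD_of_get?_eq_some d "" hdk, hdm, hdmw]
      simp; omega
    · rw [if_neg hxk]
  · rw [PySem.Dict.getD_insert, if_pos rfl, PySem.Dict.getD_of_get?_eq_some d "" hdk, hdm, hdmw]
    simpa using hmw

theorem pvPassA_fold (c : PySem.Dict String String) (N : Nat) :
    ∀ (l : List String), (∀ k ∈ l, k ∈ c.keys) →
    ∀ d ch, pvInv c N d →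
      pvInv c N (l.foldl pvStepA (d, ch)).1 ∧
      pvPot c N (l.foldl pvStepA (d, ch)).1 ≤ pvPot c N d ∧
      (ch = true → (l.foldl pvStepA (d, ch)).2 = true) ∧
      ((l.foldl pvStepA (d, ch)).2 = false →
        (l.foldl pvStepA (d, ch)).1 = d ∧
        ∀ k v, k ∈ l → d.get? k = some v →
          (PySem.Str.strIsalpha v = true ∨ d.getD k "" = d.getD (pvTarget v) "")) ∧
      (ch = false → (l.foldl pvStepA (d, ch)).2 = true →
        pvPot c N (l.foldl pvStepA (d, ch)).1 < pvPot c N d) := by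
  intro l
  induction l with
  | nil =>
    intro _ d ch hInv
    refine ⟨hInv, le_refl _, fun h => h, fun _ => ⟨rfl, by simp⟩, fun h1 h2 => ?_⟩
    simp only [List.foldl_nil] at h2; rw [h1] at h2; exact absurd h2 (by simp)
  | cons a l ih =>
    intro hl d ch hInv
    have hac : a ∈ c.keys := hl a (by simp)
    have hl' : ∀ k ∈ l, k ∈ c.keys := fun k hk => hl k (by simp [hk])
    obtain ⟨v, hdv⟩ := pvKeyVal d a (by rw [hInv.1]; exact hac)
    have hgd : d.getD a "" = v := PySem.Dict.getD_of_get?_eq_some d "" hdv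
    cases ha : PySem.Str.strIsalpha v with
    | true =>
      have hred : pvStepA (d, ch) a = (d, ch) := by
        simp only [pvStepA, hgd, ha, reduceIte]
      simp only [List.foldl_cons, hred]
      obtain ⟨c1, c2, c3, c4, c5⟩ := ih hl' d ch hInv
      refine ⟨c1, c2, c3, fun hf => ?_, c5⟩
      obtain ⟨he, hsk⟩ := c4 hf
      refine ⟨he, fun k v' hk hv' => ?_⟩
      rcases List.mem_cons.mp hk with h1 | h1
      · subst h1
        have : v' = v := by rw [hdv] at hv'; exact (Option.some_inj.mp hv').symm
        subst this; exact Or.inl ha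
      · exact hsk k v' h1 hv'
    | false =>
      obtain ⟨w, m, mw, hdw, hdm, hdmw, hmwlt, hInv', heqres⟩ :=
        pvUpdateFacts c N d hInv a v hac hdv ha
      have hgt : d.getD (pvTarget v) "" = w := PySem.Dict.getD_of_get?_eq_some d "" hdw
      by_cases hvw : v = w
      · have hred : pvStepA (d, ch) a = (d, ch) := by
          simp only [pvStepA, hgd, hgt, ha, Bool.false_eq_true, reduceIte, Bool.not_false,
            if_true]
          rw [if_pos (show (v == w) = true from beq_iff_eq.mpr hvw)]
        simp only [List.foldl_cons, hred]
        obtain ⟨c1, c2, c3, c4, c5⟩ := ih hl' d ch hInv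
        refine ⟨c1, c2, c3, fun hf => ?_, c5⟩
        obtain ⟨he, hsk⟩ := c4 hf
        refine ⟨he, fun k v' hk hv' => ?_⟩
        rcases List.mem_cons.mp hk with h1 | h1
        · subst h1
          have : v' = v := by rw [hdv] at hv'; exact (Option.some_inj.mp hv').symm
          subst this
          exact Or.inr (by rw [hgd, hgt, hvw])
        · exact hsk k v' h1 hv'
      · have hred : pvStepA (d, ch) a = (d.insert a w, true) := by
          simp only [pvStepA, hgd, hgt, ha, Bool.false_eq_true, reduceIte, Bool.not_false,
            if_true]
          rw [if_neg (by simpa using hvw)]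
        simp only [List.foldl_cons, hred]
        have hpot : pvPot c N (d.insert a w) < pvPot c N d :=
          pvPotInsert c N d a w v m mw hac hdv hdm hdmw hmwlt
        obtain ⟨c1, c2, c3, c4, c5⟩ := ih hl' (d.insert a w) true hInv'
        have hfin2 : (l.foldl pvStepA (d.insert a w, true)).2 = true := c3 rfl
        refine ⟨c1, by omega, fun _ => hfin2, fun hf => absurd hfin2 (by simp [hf]), ?_⟩
        intro _ _; omega

theorem pvFixpoint (c : PySem.Dict String String) (N : Nat)
    (hpre : ∀ k ∈ c.keys, (pvResK c N k).isSome = true)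
    (d : PySem.Dict String String) (hInv : pvInv c N d)
    (hskip : ∀ k v, k ∈ c.keys → d.get? k = some v →
      (PySem.Str.strIsalpha v = true ∨ d.getD k "" = d.getD (pvTarget v) "")) :
    ∀ k v₀, c.get? k = some v₀ → d.get? k = some (pvR c N k) := by
  intro k v₀ h
  have hkc : k ∈ c.keys := pvMemKeys c k v₀ h
  obtain ⟨v, m, m₀, hdk, heq, hsome, hdm, hdm₀, hmm₀⟩ := hInv.2 k v₀ h
  obtain ⟨r, hr⟩ := Option.isSome_iff_exists.mp hsome
  have hrv : pvResV c N v = some r := heq.trans hr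
  have halpha : PySem.Str.strIsalpha v = true := by
    cases ha : PySem.Str.strIsalpha v with
    | true => rfl
    | false =>
      exfalso
      have hvw : d.getD k "" = d.getD (pvTarget v) "" := by
        rcases hskip k v hkc hdk with h1 | h1
        · rw [h1] at ha; exact absurd ha (by simp)
        · exact h1
      obtain ⟨w, m', mw, hdw, hdm', hdmw, hmwlt, _, _⟩ :=
        pvUpdateFacts c N d hInv k v hkc hdk ha
      have hm' : m' = m := pvDistV_det c N N v m' m hdm' hdm
      have hveqw : v = w := by
        rw [PySem.Dict.getD_of_get?_eq_some d "" hdk,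
          PySem.Dict.getD_of_get?_eq_some d "" hdw] at hvw
        exact hvw
      have : m = mw := pvDistV_det c N N v m mw hdm (hveqw ▸ hdmw)
      omega
  have hrvv : r = v := by
    unfold pvResV at hrv
    rw [if_pos halpha] at hrv
    exact (Option.some_inj.mp hrv).symm
  cases N with
  | zero => exact absurd (hpre k hkc) (by simp [pvResK])
  | succ N' =>
    have hresk : pvResK c (N' + 1) k = some r := by
      obtain ⟨r'', hr''⟩ := Option.isSome_iff_exists.mp (hpre k hkc)
      have h1 : pvResK c (N' + 1) k = pvResV c N' v₀ := by rw [pvResK_succ, h]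
      have h2 : pvResV c N' v₀ = some r'' := h1 ▸ hr''
      have : r'' = r := pvResV_det c N' (N' + 1) v₀ r'' r h2 hr
      rw [hr'', this]
    rw [hdk]
    unfold pvR
    rw [hresk, hrvv]
    rfl

theorem pvLoopA_done (c : PySem.Dict String String) (N : Nat)
    (hnd : c.keys.Nodup)
    (hpre : ∀ k ∈ c.keys, (pvResK c N k).isSome = true) :
    ∀ fuel d, pvInv c N d → pvPot c N d < fuel →
      (pvLoopA fuel d).items = c.keys.map (fun k => (k, pvR c N k)) := by
  intro fuel
  induction fuel with
  | zero => intro d _ hpot; omega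
  | succ f ih =>
    intro d hInv hpot
    obtain ⟨c1, c2, c3, c4, c5⟩ := pvPassA_fold c N c.keys (fun k hk => hk) d false hInv
    have hpa' : pvPassA d = c.keys.foldl pvStepA (d, false) := by rw [pvPassA, hInv.1]
    rw [← hpa'] at c1 c2 c3 c4 c5
    simp only [pvLoopA]
    rcases hpa : pvPassA d with ⟨d', ch'⟩
    rw [hpa] at c1 c2 c4 c5
    simp only at c1 c2 c4 c5
    cases ch' with
    | false =>
      simp only
      obtain ⟨he, hsk⟩ := c4 rfl
      subst he
      have hnd' : d'.keys.Nodup := by rw [hInv.1]; exact hnd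
      rw [PySem.Dict.items_eq_map_keys d' hnd' "", hInv.1]
      apply List.map_congr_left
      intro k hk
      obtain ⟨v₀, hv₀⟩ := pvKeyVal c k hk
      have := pvFixpoint c N hpre d' hInv (fun k v hk hv => hsk k v hk hv) k v₀ hv₀
      rw [PySem.Dict.getD_of_get?_eq_some d' "" this]
    | true =>
      simp only
      exact ih d' c1 (by have := c5 trivial rfl; omega)

theorem pvAltFold (c : PySem.Dict String String) (N : Nat)
    (hpre : ∀ k ∈ c.keys, (pvResK c N k).isSome = true) :
    ∀ (l : List String), (∀ k ∈ l, k ∈ c.keys) →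
      ∀ acc memo, pvMemoInv c N memo →
        (l.foldl (pvStepB c N) (acc, memo)).1 = acc ++ l.map (fun k => (k, pvR c N k)) := by
  intro l
  induction l with
  | nil => intro _ acc memo _; simp
  | cons a l ih =>
    intro hl acc memo hm
    obtain ⟨r, hr⟩ := Option.isSome_iff_exists.mp (hpre a (hl a (by simp)))
    have hra : pvR c N a = r := by unfold pvR; rw [hr]; rfl
    obtain ⟨memo', hres, hm'⟩ :=
      pvResolveLoop_ok c N hpre N a r [] memo hr (by simp) hm
    simp only [List.foldl_cons, pvStepB, hres]
    rw [ih (fun k hk => hl k (by simp [hk])) _ _ hm']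
    simp [hra]

theorem pvInit (c : PySem.Dict String String) (n : Nat)
    (hpre : ∀ k ∈ c.keys, (pvResK c (n + 1) k).isSome = true) :
    pvInv c (n + 1) c ∧ pvPot c (n + 1) c ≤ c.keys.length * n := by
  have key : ∀ k v₀, c.get? k = some v₀ →
      ∃ m, pvResV c (n + 1) v₀ = some (pvR c (n + 1) k) ∧
        pvDistV c (n + 1) v₀ = some m ∧ m ≤ n := by
    intro k v₀ h
    have hkc : k ∈ c.keys := pvMemKeys c k v₀ h
    obtain ⟨r, hr⟩ := Option.isSome_iff_exists.mp (hpre k hkc)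
    have h1 : pvResV c n v₀ = some r := by
      have : pvResK c (n + 1) k = pvResV c n v₀ := by rw [pvResK_succ, h]
      exact this ▸ hr
    obtain ⟨m, hmd⟩ := Option.isSome_iff_exists.mp (pvDistV_isSome c n v₀ (by rw [h1]; rfl))
    refine ⟨m, ?_, pvDistV_mono c n (n + 1) v₀ m (by omega) hmd, pvDistV_le c n v₀ m hmd⟩
    rw [pvResV_mono c n (n + 1) v₀ r (by omega) h1]
    unfold pvR; rw [hr]; rfl
  constructor
  · refine ⟨rfl, fun k v₀ h => ?_⟩
    obtain ⟨m, hres, hdist, _⟩ := key k v₀ h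
    exact ⟨v₀, m, m, h, rfl, by rw [hres]; rfl, hdist, hdist, le_refl _⟩
  · unfold pvPot
    apply pvSum_le
    intro x hx
    obtain ⟨v₀, hv₀⟩ := pvKeyVal c x hx
    obtain ⟨m, _, hdist, hmn⟩ := key x v₀ hv₀
    rw [PySem.Dict.getD_of_get?_eq_some c "" hv₀, hdist]
    simpa using hmn

theorem pvMainEq (college : List (String × String))
    (hnd : (college.map Prod.fst).Nodup)
    (hpre : ∀ p ∈ college,
      (pvResK (PySem.Dict.mk college) (college.length + 1) p.1).isSome = true) :
    (pvLoopA (college.length * college.length + 2) (PySem.Dict.mk college)).items =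
      ((PySem.Dict.mk college).keys.foldl
        (pvStepB (PySem.Dict.mk college) (college.length + 1))
        ([], PySem.Dict.empty)).1 := by
  set c := PySem.Dict.mk college with hc
  have hkeys : c.keys = college.map Prod.fst := rfl
  have hndk : c.keys.Nodup := by rw [hkeys]; exact hnd
  have hpreK : ∀ k ∈ c.keys, (pvResK c (college.length + 1) k).isSome = true := by
    intro k hk
    rw [hkeys] at hk
    obtain ⟨p, hp, rfl⟩ := List.mem_map.mp hk
    exact hpre p hp
  obtain ⟨hInv0, hpot0⟩ := pvInit c college.length hpreK
  have hlen : c.keys.length = college.length := by rw [hkeys]; simp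
  have hA := pvLoopA_done c (college.length + 1) hndk hpreK
    (college.length * college.length + 2) c hInv0 (by rw [hlen] at hpot0; nlinarith)
  have hB := pvAltFold c (college.length + 1) hpreK c.keys (fun k hk => hk)
    [] PySem.Dict.empty (by intro k r h; rw [PySem.Dict.get?_empty] at h; exact absurd h (by simp))
  rw [hA, hB]
  simp

-- ===== VERDICT (by name: the statement is the Claim_ definition above) =====
theorem check_college_spec : Claim_equal_check_college := by
  intro college _ hpre
  unfold Pre_check_college at hpre
  obtain ⟨hnd, hp⟩ := hpre
  unfold Spec_check_college check_college check_college_alt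
  exact pvMainEq college hnd hp
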